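-- pv_equiv track=rewrite | github.com/yxxcrtd/jitar2012 | WebContent/WEB-INF/jython/base_action.py | convertRoundMaxNumber
-- ===== SOURCE A (Python) =====
-- def convertRoundMaxNumber(intV):
--   if intV == None:
--     return 0
--   strV = str(intV)
--   if strV.isdigit() == False:
--     return 0
--   intStrLen = len(strV)
--   if intStrLen < 2:
--     return intV
--   strPad = "0"
--   for i in range(2, intStrLen):
--     strPad = strPad + "0"
--   strV = str(int(strV[0:1]) + 1) + strPad
--   return int(strV)
-- ===== SOURCE B (Python) =====
-- def convertRoundMaxNumber(intV):
--     # None or negative (str() would not be all digits) -> 0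
--     if intV is None or intV < 0:
--         return 0
--     # single digit passes through unchanged
--     if intV < 10:
--         return intV
--     # p = largest power of 10 not exceeding intV
--     p = 10
--     while p * 10 <= intV:
--         p *= 10
--     # leading digit + 1, times that power of 10
--     return (intV // p + 1) * p
-- ===== Notes on version B (the rewrite author's own statement) =====
-- stated objective: alternative
-- what changed: Replaces the str()/isdigit/zero-pad-loop/int() round-trip with pure integer arithmetic: find the largest power of ten p <= n by a multiplicative loop and return (n//p + 1)*p.
import Mathlib
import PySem

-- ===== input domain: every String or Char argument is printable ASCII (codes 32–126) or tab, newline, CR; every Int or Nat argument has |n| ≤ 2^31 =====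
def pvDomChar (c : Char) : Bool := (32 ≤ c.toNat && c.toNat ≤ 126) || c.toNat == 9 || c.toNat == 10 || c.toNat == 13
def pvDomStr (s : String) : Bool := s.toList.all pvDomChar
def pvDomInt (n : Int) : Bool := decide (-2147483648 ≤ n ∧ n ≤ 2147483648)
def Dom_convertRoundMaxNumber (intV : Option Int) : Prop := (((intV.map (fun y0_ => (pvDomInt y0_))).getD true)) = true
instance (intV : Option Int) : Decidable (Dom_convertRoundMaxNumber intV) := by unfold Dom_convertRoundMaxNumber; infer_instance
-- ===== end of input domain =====

-- B replaces A's str()/isdigit/zero-pad-loop/int() round-trip by pure integer arithmetic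
-- (largest power of ten p ≤ n found by a multiplicative loop, then (n//p + 1)*p).

-- ===== PORT A =====
-- Python strings are modeled as char lists on the PySem.Chars side (str(intV) = PySem.Int.toChars,
-- '+' on strings = List append, int(s) = PySem.Int.ofChars?).
-- The two '.getD 0' are unreachable: both parses are guarded by strV.isdigit() == True.
def convertRoundMaxNumber (intV : Option Int) : Int :=
  match intV with
  | none => 0
  | some v =>
    let strV := PySem.Int.toChars v
    if PySem.Chars.strIsdigit strV = false then 0
    else
      let intStrLen := PySem.List.len strV
      if intStrLen < 2 then v
      else
        let strPad := (PySem.List.pyRange 2 intStrLen 1).foldl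
          (fun acc _ => acc ++ (['0'] : List Char)) (['0'] : List Char)
        let strV2 := PySem.Int.toChars
          ((PySem.Int.ofChars? (PySem.List.slice strV (some 0) (some 1))).getD 0 + 1) ++ strPad
        (PySem.Int.ofChars? strV2).getD 0

-- ===== PORT B =====
-- while p * 10 <= v: p *= 10   (the '0 < p' conjunct only makes the recursion total; it holds
-- at every call B makes, since the loop starts at p = 10 and only multiplies by 10)
def pvPow10Loop (v p : Int) : Int :=
  if h : 0 < p ∧ p * 10 ≤ v then pvPow10Loop v (p * 10) else p
termination_by (v - p).toNat
decreasing_by omega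

def convertRoundMaxNumber_alt (intV : Option Int) : Int :=
  match intV with
  | none => 0
  | some v =>
    if v < 0 then 0
    else if v < 10 then v
    else
      let p := pvPow10Loop v 10
      (PySem.Int.floordiv v p + 1) * p

-- ===== PRECONDITION & SPEC =====
def Spec_convertRoundMaxNumber (intV : Option Int) (out : Int) : Prop := out = convertRoundMaxNumber_alt intV
instance (intV : Option Int) (out : Int) : Decidable (Spec_convertRoundMaxNumber intV out) := by unfold Spec_convertRoundMaxNumber; infer_instance

-- ===== CLAIM (what is proved, stated in full; the proofs are below) =====
def Claim_equal_convertRoundMaxNumber : Prop := ∀ (intV : Option Int), Dom_convertRoundMaxNumber intV → Spec_convertRoundMaxNumber intV (convertRoundMaxNumber intV)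

-- ===== LEMMAS AND PROOFS =====

-- Reference decimal-digit spec: most significant digit first.
def pvS (n : Nat) : List Char :=
  if _ : n < 10 then [Nat.digitChar n]
  else pvS (n / 10) ++ [Nat.digitChar (n % 10)]
decreasing_by exact Nat.div_lt_self (by omega) (by omega)

lemma pvS_small {n : Nat} (h : n < 10) : pvS n = [Nat.digitChar n] := by
  rw [pvS]; simp [h]

lemma pvS_step {n : Nat} (h : ¬ n < 10) : pvS n = pvS (n / 10) ++ [Nat.digitChar (n % 10)] := by
  conv_lhs => rw [pvS]
  simp [h]

lemma toDigitsCore_eq_pvS : ∀ (fuel n : Nat) (ds : List Char), n ≤ fuel →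
    Nat.toDigitsCore 10 (fuel + 1) n ds = pvS n ++ ds := by
  intro fuel
  induction fuel with
  | zero =>
    intro n ds hn
    interval_cases n
    simp [Nat.toDigitsCore, pvS_small]
  | succ f ih =>
    intro n ds hn
    rw [Nat.toDigitsCore]
    by_cases h10 : n < 10
    · have : n / 10 = 0 := Nat.div_eq_of_lt h10
      simp [this, pvS_small h10, Nat.mod_eq_of_lt h10]
    · have hne : ¬ n / 10 = 0 := by
        intro h; omega
      rw [if_neg hne, ih (n / 10) _ (by omega), pvS_step h10, List.append_assoc]
      rfl

lemma toDigits_eq_pvS (n : Nat) : Nat.toDigits 10 n = pvS n := by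
  have := toDigitsCore_eq_pvS n n [] le_rfl
  simpa [Nat.toDigits] using this

lemma isdigit_digitChar {m : Nat} (h : m < 10) : PySem.Chars.isdigit (Nat.digitChar m) = true := by
  interval_cases m <;> decide

lemma pvS_all_isdigit (n : Nat) : ∀ c ∈ pvS n, PySem.Chars.isdigit c = true := by
  induction n using pvS.induct with
  | case1 n h =>
    intro c hc
    rw [pvS_small h] at hc
    simp at hc
    subst hc
    exact isdigit_digitChar h
  | case2 n h ih =>
    intro c hc
    rw [pvS_step h] at hc
    rcases List.mem_append.1 hc with hc | hc
    · exact ih c hc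
    · simp at hc
      subst hc
      exact isdigit_digitChar (Nat.mod_lt n (by omega))

lemma pvS_ne_nil (n : Nat) : pvS n ≠ [] := by
  by_cases h : n < 10
  · rw [pvS_small h]; simp
  · rw [pvS_step h]; simp

lemma pvS_bounds : ∀ {n : Nat}, 1 ≤ n →
    10 ^ ((pvS n).length - 1) ≤ n ∧ n < 10 ^ (pvS n).length := by
  intro n
  induction n using pvS.induct with
  | case1 n h =>
    intro h1
    rw [pvS_small h]
    simpa using ⟨h1, h⟩
  | case2 n h ih =>
    intro _
    have h1 : 1 ≤ n / 10 := by omega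
    obtain ⟨lo, hi⟩ := ih h1
    obtain ⟨l, hl⟩ : ∃ l, (pvS (n / 10)).length = l + 1 :=
      ⟨(pvS (n / 10)).length - 1, by
        have := List.length_pos_of_ne_nil (pvS_ne_nil (n / 10)); omega⟩
    rw [hl] at lo hi
    simp only [Nat.add_sub_cancel] at lo
    have key1 : (10:Nat) ^ (l + 1) ≤ n := by
      have e : (10:Nat) ^ (l + 1) = 10 * 10 ^ l := by ring
      have h2 : 10 * (n / 10) ≤ n := Nat.mul_div_le n 10
      omega
    have key2 : n < (10:Nat) ^ (l + 1 + 1) := by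
      have e : (10:Nat) ^ (l + 1 + 1) = 10 * 10 ^ (l + 1) := by ring
      omega
    rw [pvS_step h, List.length_append, hl]
    constructor
    · convert key1 using 2
    · convert key2 using 2

lemma pvS_head : ∀ {n : Nat}, 1 ≤ n →
    ∃ rest, pvS n = Nat.digitChar (n / 10 ^ rest.length) :: rest := by
  intro n
  induction n using pvS.induct with
  | case1 n h =>
    intro _
    exact ⟨[], by rw [pvS_small h]; simp⟩
  | case2 n h ih =>
    intro _
    obtain ⟨r, hr⟩ := ih (by omega)
    refine ⟨r ++ [Nat.digitChar (n % 10)], ?_⟩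
    rw [pvS_step h, hr]
    have e : n / 10 / 10 ^ r.length = n / 10 ^ (r ++ [Nat.digitChar (n % 10)]).length := by
      rw [Nat.div_div_eq_div_mul]
      congr 1
      rw [List.length_append, List.length_cons, List.length_nil, pow_succ]
      ring
    rw [List.cons_append, e]

lemma foldl_pad (l : List Int) (a : List Char) :
    l.foldl (fun acc _ => acc ++ (['0'] : List Char)) a = a ++ List.replicate l.length '0' := by
  induction l generalizing a with
  | nil => simp
  | cons x xs ih =>
    simp only [List.foldl_cons, List.length_cons, ih]
    rw [List.append_assoc]
    congr 1

lemma parse_single_digit {d : Nat} (h : d < 10) :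
    PySem.Int.ofChars? [Nat.digitChar d] = some (d : Int) := by
  interval_cases d <;> decide

lemma parse_padded {d L : Nat} (h1 : 1 ≤ d) (h9 : d ≤ 9) (hL1 : 1 ≤ L) (hL9 : L ≤ 9) :
    PySem.Int.ofChars? (PySem.Int.toChars ((d : Int) + 1) ++ List.replicate L '0')
      = some (((d : Int) + 1) * 10 ^ L) := by
  interval_cases d <;> interval_cases L <;> decide

lemma pow10Loop_eq (v : Int) : ∀ (m j : Nat), 1 ≤ j →
    (10 : Int) ^ (j + m) ≤ v → v < 10 ^ (j + m + 1) →
    pvPow10Loop v (10 ^ j) = 10 ^ (j + m) := by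
  intro m
  induction m with
  | zero =>
    intro j _ hlo hhi
    rw [pvPow10Loop, dif_neg]
    · simp
    · rintro ⟨-, hle⟩
      have e : (10:Int) ^ (j + 0 + 1) = 10 ^ j * 10 := by ring
      omega
  | succ m ih =>
    intro j hj hlo hhi
    have e : (10:Int) ^ j * 10 = 10 ^ (j + 1) := by ring
    rw [pvPow10Loop, dif_pos]
    · rw [e]
      have := ih (j + 1) (by omega)
        (by rw [show j + 1 + m = j + (m + 1) from by omega]; exact hlo)
        (by rw [show j + 1 + m + 1 = j + (m + 1) + 1 from by omega]; exact hhi)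
      rw [this, show j + 1 + m = j + (m + 1) from by omega]
    · refine ⟨by positivity, ?_⟩
      have hle : (10:Int) ^ (j + 1) ≤ 10 ^ (j + (m + 1)) :=
        pow_le_pow_right₀ (by norm_num) (by omega)
      omega

lemma strIsdigit_pvS (n : Nat) : PySem.Chars.strIsdigit (pvS n) = true := by
  unfold PySem.Chars.strIsdigit
  rw [Bool.and_eq_true]
  refine ⟨?_, ?_⟩
  · simpa [List.isEmpty_iff] using pvS_ne_nil n
  · rw [List.all_eq_true]
    exact pvS_all_isdigit n

lemma toChars_natCast_eq_pvS (n : Nat) : PySem.Int.toChars (n : Int) = pvS n := by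
  simp [PySem.Int.toChars, toDigits_eq_pvS]

-- ===== VERDICT (by name: the statement is the Claim_ definition above) =====
theorem convertRoundMaxNumber_spec : Claim_equal_convertRoundMaxNumber := by
  unfold Claim_equal_convertRoundMaxNumber Spec_convertRoundMaxNumber
  rintro (_ | ⟨v⟩) hdom
  · rfl
  · simp only [Dom_convertRoundMaxNumber, Option.map_some, Option.getD_some, pvDomInt,
      decide_eq_true_eq] at hdom
    by_cases hneg : v < 0
    · simp [convertRoundMaxNumber, convertRoundMaxNumber_alt, PySem.Int.toChars, hneg,
        PySem.Chars.strIsdigit, PySem.Chars.isdigit]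
    · rw [not_lt] at hneg
      obtain ⟨n, rfl⟩ := Int.eq_ofNat_of_zero_le hneg
      have htc := toChars_natCast_eq_pvS n
      by_cases hn10 : n < 10
      · -- single digit: A returns v through the len < 2 branch, B through the v < 10 branch
        have hl1 : (pvS n).length = 1 := by rw [pvS_small hn10]; rfl
        simp only [convertRoundMaxNumber, convertRoundMaxNumber_alt, htc, strIsdigit_pvS,
          PySem.List.len_eq, hl1]
        rw [if_neg (by simp), if_pos (by norm_num), if_neg (by omega),
          if_pos (by exact_mod_cast hn10)]
      · -- n ≥ 10
        rw [not_lt] at hn10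
        obtain ⟨rest, hrest⟩ := pvS_head (n := n) (by omega)
        set k := rest.length with hk
        have hLen : (pvS n).length = k + 1 := by rw [hrest]; rfl
        obtain ⟨hlo, hhi⟩ := pvS_bounds (n := n) (by omega)
        rw [hLen] at hlo hhi
        simp only [Nat.add_sub_cancel] at hlo
        have hk1 : 1 ≤ k := by
          by_contra hcon
          have hz : k = 0 := by omega
          rw [hz] at hhi
          norm_num at hhi
          omega
        have hk9 : k ≤ 9 := by
          by_contra hcon
          have h10 : (10:Nat) ^ 10 ≤ 10 ^ k := Nat.pow_le_pow_right (by norm_num) (by omega)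
          have he : (10:Nat) ^ 10 = 10000000000 := by norm_num
          omega
        set d := n / 10 ^ k with hd
        have hd1 : 1 ≤ d := (Nat.one_le_div_iff (by positivity)).2 hlo
        have hd9 : d ≤ 9 := by
          have hlt : d < 10 := (Nat.div_lt_iff_lt_mul (by positivity)).2 (by
            calc n < 10 ^ (k + 1) := hhi
              _ = 10 * 10 ^ k := by ring)
          omega
        have hA : convertRoundMaxNumber (some (n : Int)) = ((d : Int) + 1) * 10 ^ k := by
          simp only [convertRoundMaxNumber, htc, strIsdigit_pvS, PySem.List.len_eq, hLen]
          rw [if_neg (by simp), if_neg (by push_cast; omega)]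
          rw [foldl_pad, PySem.List.length_pyRange_one]
          have hpadlen : (((k + 1 : Nat) : Int) - 2).toNat = k - 1 := by omega
          rw [hpadlen]
          have hpad : (['0'] : List Char) ++ List.replicate (k - 1) '0'
              = List.replicate k '0' := by
            rw [List.singleton_append, ← List.replicate_succ]
            congr 1
            omega
          rw [hpad, hrest]
          have hslice : PySem.List.slice (Nat.digitChar (n / 10 ^ k) :: rest)
              (some 0) (some 1) = [Nat.digitChar (n / 10 ^ k)] := by
            simp [pysem]
          rw [hk] at hslice
          rw [hslice, parse_single_digit (by omega : d < 10)]
          simp only [Option.getD_some]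
          rw [parse_padded hd1 hd9 hk1 hk9]
          simp
        have hB : convertRoundMaxNumber_alt (some (n : Int)) = ((d : Int) + 1) * 10 ^ k := by
          simp only [convertRoundMaxNumber_alt]
          rw [if_neg (by omega), if_neg (by exact_mod_cast not_lt.2 hn10)]
          have hloZ : (10 : Int) ^ (1 + (k - 1)) ≤ (n : Int) := by
            rw [show 1 + (k - 1) = k from by omega]
            exact_mod_cast hlo
          have hhiZ : (n : Int) < 10 ^ (1 + (k - 1) + 1) := by
            rw [show 1 + (k - 1) + 1 = k + 1 from by omega]
            exact_mod_cast hhi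
          have hp : pvPow10Loop (n : Int) 10 = 10 ^ k := by
            have hloop := pow10Loop_eq (n : Int) (k - 1) 1 le_rfl hloZ hhiZ
            rw [show ((10 : Int) ^ 1) = 10 from by norm_num] at hloop
            rw [hloop, show 1 + (k - 1) = k from by omega]
          rw [hp]
          congr 1
          rw [PySem.Int.floordiv_eq_ediv_of_pos (by positivity)]
          rw [hd]
          push_cast [Int.natCast_ediv]
          ring
        rw [hA, hB]
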